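-- pv_equiv track=rewrite | github.com/matslindh/codingchallenges | knowit2020/02.py | previous_prime_table
-- ===== SOURCE A (Python) =====
-- def previous_prime_table(primes):
--     lookup = [None]*len(primes)
--     previous = 0
--
--     for idx, is_prime in enumerate(primes):
--         if is_prime:
--             previous = idx
--
--         lookup[idx] = previous
--
--     return lookup
-- ===== SOURCE B (Python) =====
-- def previous_prime_table(primes):
--     prime_indices = [i for i, p in enumerate(primes) if p]
--
--     def bisect_right(a, x):
--         lo, hi = 0, len(a)
--         while lo < hi:
--             mid = (lo + hi) // 2
--             if x < a[mid]:
--                 hi = mid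
--             else:
--                 lo = mid + 1
--         return lo
--
--     out = []
--     for i in range(len(primes)):
--         k = bisect_right(prime_indices, i)
--         out.append(prime_indices[k - 1] if k > 0 else 0)
--     return out
-- ===== Notes on version B (the rewrite author's own statement) =====
-- stated objective: alternative
-- what changed: Replaced A's single forward pass carrying a running 'last prime index' variable with a precomputed sorted table of prime indices queried by binary search (bisect_right) for each position.
import Mathlib
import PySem

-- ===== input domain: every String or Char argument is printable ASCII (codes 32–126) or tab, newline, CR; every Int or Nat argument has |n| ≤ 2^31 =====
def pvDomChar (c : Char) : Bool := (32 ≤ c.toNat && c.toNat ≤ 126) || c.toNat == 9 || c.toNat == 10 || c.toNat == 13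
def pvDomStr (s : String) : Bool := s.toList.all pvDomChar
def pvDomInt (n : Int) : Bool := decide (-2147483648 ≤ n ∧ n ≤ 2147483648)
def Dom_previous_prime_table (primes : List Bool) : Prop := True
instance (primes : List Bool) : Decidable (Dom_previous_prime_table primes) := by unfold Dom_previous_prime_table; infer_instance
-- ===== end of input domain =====

-- B replaces A's forward carry of a running 'last prime index' with a precomputed
-- prime-index table queried by binary search per position (objective: alternative).

-- ===== PORT A =====
-- A fills a preallocated list lookup[idx] in strictly increasing idx order,
-- so the ordered build below (appending lookup[idx] at step idx) is exact.
def previous_prime_table (primes : List Bool) : List Int :=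
  ((PySem.List.enumerate primes 0).foldl
    (fun (st : Int × List Int) p =>
      let previous := if p.2 then p.1 else st.1
      (previous, st.2 ++ [previous]))
    (0, [])).2

-- ===== PORT B =====
-- Source B's hand-written bisect_right is byte-for-byte the stdlib algorithm;
-- ported as the prelude's PySem.List.bisectRight (same lo/hi halving loop).
def previous_prime_table_alt (primes : List Bool) : List Int :=
  let primeIndices : List Int :=
    (PySem.List.enumerate primes 0).filterMap (fun p => if p.2 then some p.1 else none)
  (PySem.List.pyRange 0 primes.length 1).map (fun i =>
    let k := PySem.List.bisectRight primeIndices i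
    if k > 0 then primeIndices.getD (k - 1) 0 else 0)

-- ===== PRECONDITION & SPEC =====
def Spec_previous_prime_table (primes : List Bool) (out : List Int) : Prop := out = previous_prime_table_alt primes
instance (primes : List Bool) (out : List Int) : Decidable (Spec_previous_prime_table primes out) := by unfold Spec_previous_prime_table; infer_instance

-- ===== CLAIM (what is proved, stated in full; the proofs are below) =====
def Claim_equal_previous_prime_table : Prop := ∀ (primes : List Bool), Dom_previous_prime_table primes → Spec_previous_prime_table primes (previous_prime_table primes)

-- ===== LEMMAS AND PROOFS =====

-- A's loop as a structural recursion: carried value prev, current index k.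
def pvAux (prev : Int) (k : Int) : List Bool → List Int
  | [] => []
  | b :: bs => (if b then k else prev) :: pvAux (if b then k else prev) (k + 1) bs

-- the prime-index table as a structural recursion
def pvPidx (k : Int) : List Bool → List Int
  | [] => []
  | b :: bs => if b then k :: pvPidx (k + 1) bs else pvPidx (k + 1) bs

theorem pvFoldA (bs : List Bool) : ∀ (s prev : Int) (acc : List Int),
    ((PySem.List.enumerate bs s).foldl
      (fun (st : Int × List Int) p =>
        let previous := if p.2 then p.1 else st.1
        (previous, st.2 ++ [previous]))
      (prev, acc)).2 = acc ++ pvAux prev s bs := by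
  induction bs with
  | nil => intro s prev acc; simp [PySem.List.enumerate_nil, pvAux]
  | cons b bs ih =>
    intro s prev acc
    simp only [PySem.List.enumerate_cons, List.foldl_cons, pvAux, ih]
    simp

theorem pvFilterPidx (bs : List Bool) : ∀ (s : Int),
    (PySem.List.enumerate bs s).filterMap (fun p => if p.2 then some p.1 else none)
      = pvPidx s bs := by
  induction bs with
  | nil => intro s; simp [PySem.List.enumerate_nil, pvPidx]
  | cons b bs ih =>
    intro s
    simp only [PySem.List.enumerate_cons, List.filterMap_cons, pvPidx]
    cases b <;> simp [ih]

theorem pvPidx_bound (bs : List Bool) : ∀ (k : Int) (y : Int), y ∈ pvPidx k bs → k ≤ y := by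
  induction bs with
  | nil => intro k y h; simp [pvPidx] at h
  | cons b bs ih =>
    intro k y h
    cases b <;> simp [pvPidx] at h
    · exact le_trans (by omega) (ih (k+1) y h)
    · rcases h with h | h
      · omega
      · exact le_trans (by omega) (ih (k+1) y h)

theorem pvPidx_pairwise (bs : List Bool) : ∀ (k : Int), List.Pairwise (· ≤ ·) (pvPidx k bs) := by
  induction bs with
  | nil => intro k; simp [pvPidx]
  | cons b bs ih =>
    intro k
    cases b <;> simp [pvPidx]
    · exact ih (k+1)
    · exact ⟨fun y hy => le_trans (by omega) (pvPidx_bound bs (k+1) y hy), ih (k+1)⟩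

theorem pvAux_length (bs : List Bool) : ∀ (prev k : Int), (pvAux prev k bs).length = bs.length := by
  induction bs with
  | nil => intro prev k; simp [pvAux]
  | cons b bs ih => intro prev k; simp [pvAux, ih]

-- countP over a table whose elements all exceed the threshold is 0
theorem pvCountP_zero (bs : List Bool) (k x : Int) (hx : x < k) :
    (pvPidx k bs).countP (fun y => decide (y ≤ x)) = 0 := by
  apply List.countP_eq_zero.mpr
  intro y hy
  have := pvPidx_bound bs k y hy
  simp; omega

-- the heart: A's carried value at position i is the bisect-style lookup in the table
theorem pvMain (bs : List Bool) : ∀ (prev k : Int) (i : Nat) (h : i < bs.length),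
    (pvAux prev k bs)[i]'(by rw [pvAux_length]; exact h) =
      (let T := pvPidx k bs
       let c := T.countP (fun y => decide (y ≤ k + (i : Int)))
       if c > 0 then T.getD (c - 1) 0 else prev) := by
  induction bs with
  | nil => intro prev k i h; simp at h
  | cons b bs ih =>
    intro prev k i h
    cases i with
    | zero =>
      have hz : ∀ x : Int, x < k + 1 → (pvPidx (k+1) bs).countP (fun y => decide (y ≤ x)) = 0 :=
        fun x hx => pvCountP_zero bs (k+1) x hx
      cases b <;> simp [pvAux, pvPidx, hz k (by omega)]
    | succ i =>
      have h' : i < bs.length := by simpa using Nat.lt_of_succ_lt_succ h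
      have hthr : k + ((i + 1 : Nat) : Int) = (k + 1) + (i : Int) := by push_cast; ring
      cases b with
      | false =>
        simp only [pvAux, pvPidx, List.getElem_cons_succ, Bool.false_eq_true, if_false]
        rw [ih prev (k + 1) i h', hthr]
      | true =>
        simp only [pvAux, pvPidx, List.getElem_cons_succ, if_true]
        rw [ih k (k + 1) i h', hthr, List.countP_cons]
        have hk : (decide (k ≤ (k + 1) + (i : Int))) = true := by simp; omega
        rw [hk]
        cases hcc : (pvPidx (k + 1) bs).countP (fun y => decide (y ≤ (k + 1) + (i : Int))) with
        | zero => simp [hcc]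
        | succ m => simp [hcc]

-- bisectRight on the (sorted) table counts the elements ≤ x
theorem pvBisect_eq_countP (T : List Int) (x : Int) (hs : List.Pairwise (· ≤ ·) T) :
    PySem.List.bisectRight T x = T.countP (fun y => decide (y ≤ x)) := by
  obtain ⟨hle, hlo, hhi⟩ := PySem.List.bisectRight_spec T x hs
  set r := PySem.List.bisectRight T x with hr
  rw [← List.take_append_drop r T, List.countP_append]
  have h1 : (T.take r).countP (fun y => decide (y ≤ x)) = r := by
    rw [List.countP_eq_length.mpr, List.length_take_of_le hle]
    intro a ha
    obtain ⟨j, hj, rfl⟩ := List.mem_iff_getElem.mp ha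
    have hjr : j < r := by have := hj; simp [List.length_take] at this; omega
    have hjl : j < T.length := by omega
    rw [List.getElem_take]
    simpa using hlo j hjl hjr
  have h2 : (T.drop r).countP (fun y => decide (y ≤ x)) = 0 := by
    apply List.countP_eq_zero.mpr
    intro a ha
    obtain ⟨j, hj, rfl⟩ := List.mem_iff_getElem.mp ha
    have hjl : r + j < T.length := by have := hj; simp [List.length_drop] at this; omega
    rw [List.getElem_drop]
    have := hhi (r + j) hjl (by omega)
    simp; omega
  omega

-- ===== VERDICT (by name: the statement is the Claim_ definition above) =====
theorem previous_prime_table_spec : Claim_equal_previous_prime_table := by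
  intro primes _
  unfold Spec_previous_prime_table previous_prime_table previous_prime_table_alt
  rw [pvFoldA, List.nil_append, pvFilterPidx]
  apply List.ext_getElem
  · simp [pvAux_length, PySem.List.length_pyRange_one]
  · intro i h1 h2
    rw [pvMain primes 0 0 i (by simpa [pvAux_length] using h1)]
    rw [List.getElem_map, PySem.List.getElem_pyRange_one]
    rw [pvBisect_eq_countP _ _ (pvPidx_pairwise primes 0)]
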